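-- pv_equiv track=rewrite | github.com/deeptechhouse/raiveFlier | src/services/ingestion/source_processors/pdf_processor.py | _group_by_page_count
-- ===== SOURCE A (Python) =====
-- def _group_by_page_count(
--     pages: list[tuple[int, str]],
--     pages_per_section: int = 10,
-- ) -> list[tuple[str, str]]:
--     """Group pages into fixed-size sections when no chapters are detected."""
--     sections: list[tuple[str, str]] = []
--     for start in range(0, len(pages), pages_per_section):
--         batch = pages[start : start + pages_per_section]
--         text = "\n\n".join(t for _, t in batch)
--         if text.strip():
--             sections.append((text.strip(), str(batch[0][0])))
--     return sections
-- ===== SOURCE B (Python) =====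
-- def _group_by_page_count(
--     pages: list[tuple[int, str]],
--     pages_per_section: int = 10,
-- ) -> list[tuple[str, str]]:
--     """Group pages into fixed-size sections: one streaming pass with a buffer."""
--     sections: list[tuple[str, str]] = []
--     buf: list[str] = []
--     start_pid = 0
--     for pid, t in pages:
--         if not buf:
--             start_pid = pid
--         buf.append(t)
--         if len(buf) >= pages_per_section:
--             text = "\n\n".join(buf).strip()
--             if text:
--                 sections.append((text, str(start_pid)))
--             buf = []
--     if buf:
--         text = "\n\n".join(buf).strip()
--         if text:
--             sections.append((text, str(start_pid)))
--     return sections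
-- ===== Notes on version B (the rewrite author's own statement) =====
-- stated objective: alternative
-- what changed: Replaces range/slice chunk extraction (index arithmetic plus repeated list slicing) with a single streaming pass that accumulates page texts in a buffer, records the first page id of each chunk, and flushes the buffer whenever it reaches pages_per_section and once at the end.
-- outside the precondition, e.g. on _group_by_page_count([(1, 'x')], -2): A returns [], B returns [('x', '1')]; on _group_by_page_count([(1, 'x')], 0): A raises ValueError, B returns [('x', '1')]
import Mathlib
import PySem

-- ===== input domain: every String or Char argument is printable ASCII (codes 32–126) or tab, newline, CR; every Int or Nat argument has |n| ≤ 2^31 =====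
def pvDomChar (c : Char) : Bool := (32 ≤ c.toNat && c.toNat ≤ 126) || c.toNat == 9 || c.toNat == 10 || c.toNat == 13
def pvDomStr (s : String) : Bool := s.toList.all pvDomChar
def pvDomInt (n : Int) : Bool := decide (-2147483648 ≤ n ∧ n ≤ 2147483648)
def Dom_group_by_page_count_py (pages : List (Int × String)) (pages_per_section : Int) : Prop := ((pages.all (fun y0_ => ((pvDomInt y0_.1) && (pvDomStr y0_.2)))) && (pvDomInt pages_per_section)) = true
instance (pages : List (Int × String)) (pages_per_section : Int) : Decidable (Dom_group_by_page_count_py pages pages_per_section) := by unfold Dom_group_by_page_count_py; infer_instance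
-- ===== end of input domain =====

-- B replaces A's range/slice chunking by one streaming pass with a text buffer and a
-- remembered first page id (objective: alternative decomposition, same cost).

-- ===== PORT A =====
-- loop body of A's 'for start in range(...)'
def pvStepA (pages : List (Int × String)) (pages_per_section : Int)
    (sections : List (String × String)) (start : Int) : List (String × String) :=
  let batch := PySem.List.slice pages (some start) (some (start + pages_per_section))
  let text := PySem.Str.join "\n\n" (batch.map (fun p => p.2))
  if PySem.Str.strip text ≠ "" then
    sections ++ [(PySem.Str.strip text, PySem.Int.toStr (((PySem.List.pyGet? batch 0).getD (0, "")).1))]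
  else sections

def group_by_page_count_py (pages : List (Int × String)) (pages_per_section : Int) : List (String × String) :=
  (PySem.List.pyRange 0 (pages.length : Int) pages_per_section).foldl
    (pvStepA pages pages_per_section) []

-- ===== PORT B =====
-- flush of B: join the buffered texts, strip, append if non-empty
def pvFlushB (sections : List (String × String)) (buf : List String) (sp : Int) : List (String × String) :=
  let text := PySem.Str.strip (PySem.Str.join "\n\n" buf)
  if text ≠ "" then sections ++ [(text, PySem.Int.toStr sp)] else sections

-- loop body of B's 'for pid, t in pages'; state = (sections, buf, start_pid)
def pvStepB (pages_per_section : Int)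
    (st : List (String × String) × List String × Int) (pt : Int × String) :
    List (String × String) × List String × Int :=
  let sp := if st.2.1.isEmpty then pt.1 else st.2.2
  let buf := st.2.1 ++ [pt.2]
  if (buf.length : Int) ≥ pages_per_section then (pvFlushB st.1 buf sp, ([] : List String), sp)
  else (st.1, buf, sp)

def group_by_page_count_py_alt (pages : List (Int × String)) (pages_per_section : Int) : List (String × String) :=
  let st := pages.foldl (pvStepB pages_per_section) ([], [], 0)
  if st.2.1 ≠ [] then pvFlushB st.1 st.2.1 st.2.2 else st.1

-- ===== PRECONDITION & SPEC =====
-- Pre_ restricts to the function's natural domain of positive section sizes (the caller's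
-- default is 10): on pages_per_section = 0 A raises ValueError (range() step 0), and a
-- negative section size is outside the natural domain, so no behaviour is claimed there.
def Pre_group_by_page_count_py (pages : List (Int × String)) (pages_per_section : Int) : Prop :=
  1 ≤ pages_per_section

instance (pages : List (Int × String)) (pages_per_section : Int) : Decidable (Pre_group_by_page_count_py pages pages_per_section) := by unfold Pre_group_by_page_count_py; infer_instance

def pvWitness_group_by_page_count_py : (List (Int × String)) × Int :=
  ([(1, "alpha"), (2, "beta"), (3, "gamma")], 2)

def Spec_group_by_page_count_py (pages : List (Int × String)) (pages_per_section : Int) (out : List (String × String)) : Prop := out = group_by_page_count_py_alt pages pages_per_section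
instance (pages : List (Int × String)) (pages_per_section : Int) (out : List (String × String)) : Decidable (Spec_group_by_page_count_py pages pages_per_section out) := by unfold Spec_group_by_page_count_py; infer_instance

-- ===== CLAIM (what is proved, stated in full; the proofs are below) =====
def Claim_equal_group_by_page_count_py : Prop := ∀ (pages : List (Int × String)) (pages_per_section : Int), Dom_group_by_page_count_py pages pages_per_section → Pre_group_by_page_count_py pages pages_per_section → Spec_group_by_page_count_py pages pages_per_section (group_by_page_count_py pages pages_per_section)

-- ===== LEMMAS AND PROOFS =====

-- common chunked recursion both ports are reduced to
def pvChunk (k : Nat) (acc : List (String × String)) : List (Int × String) → List (String × String)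
  | [] => acc
  | p :: ps =>
      pvChunk k (pvFlushB acc ((p :: ps.take (k - 1)).map (fun q => q.2)) p.1) (ps.drop (k - 1))
termination_by l => l.length
decreasing_by simp only [List.length_drop, List.length_cons]; omega

theorem pvChunk_nil (k : Nat) (acc : List (String × String)) : pvChunk k acc [] = acc := by
  rw [pvChunk]

theorem pvChunk_cons (k : Nat) (acc : List (String × String)) (p : Int × String) (ps : List (Int × String)) :
    pvChunk k acc (p :: ps) =
      pvChunk k (pvFlushB acc ((p :: ps.take (k - 1)).map (fun q => q.2)) p.1) (ps.drop (k - 1)) := by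
  rw [pvChunk]

-- pyRange 0 n k, positive step, peels its first element
theorem pvRange_shift (n k : Int) (hk : 1 ≤ k) (hn : 0 < n) :
    PySem.List.pyRange 0 n k = 0 :: (PySem.List.pyRange 0 (n - k) k).map (fun s => s + k) := by
  rw [PySem.List.pyRange_of_pos 0 n (by omega), PySem.List.pyRange_of_pos 0 (n - k) (by omega)]
  have hcount : (if (0:Int) < n then ((n - 0 + k - 1) / k).toNat else 0)
      = (if (0:Int) < n - k then ((n - k - 0 + k - 1) / k).toNat else 0) + 1 := by
    rw [if_pos hn]
    by_cases h : (0:Int) < n - k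
    · rw [if_pos h]
      have h1 : n - 0 + k - 1 = (n - k - 0 + k - 1) + 1 * k := by ring
      rw [h1, Int.add_mul_ediv_right _ _ (by omega : k ≠ 0)]
      have h2 : (0:Int) ≤ (n - k - 0 + k - 1) / k := Int.ediv_nonneg (by omega) (by omega)
      omega
    · rw [if_neg h]
      have h1 : (n - 0 + k - 1) / k = 1 := by
        have : n - 0 + k - 1 = (n - 1) + 1 * k := by ring
        rw [this, Int.add_mul_ediv_right _ _ (by omega : k ≠ 0),
          Int.ediv_eq_zero_of_lt (by omega) (by omega)]
        omega
      rw [h1]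
      omega
  rw [hcount, List.range_succ_eq_map, List.map_cons, List.map_map, List.map_map]
  congr 1
  · simp
  · apply List.map_congr_left
    intro j _
    simp [Function.comp]
    push_cast
    ring

theorem pvRange_nonpos (n k : Int) (hk : 0 < k) (hn : n ≤ 0) : PySem.List.pyRange 0 n k = [] := by
  rw [PySem.List.pyRange_of_pos 0 n hk, if_neg (by omega)]
  simp

-- A's loop body, shifted start, acts on the dropped list
theorem pvStepA_shift (pages : List (Int × String)) (k s : Int) (hk : 1 ≤ k) (hs : 0 ≤ s)
    (acc : List (String × String)) :
    pvStepA pages k acc (s + k) = pvStepA (pages.drop k.toNat) k acc s := by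
  unfold pvStepA
  have hb : PySem.List.slice pages (some (s + k)) (some (s + k + k))
      = PySem.List.slice (pages.drop k.toNat) (some s) (some (s + k)) := by
    rw [PySem.List.slice_toNat _ (by omega) (by omega), PySem.List.slice_toNat _ (by omega) (by omega)]
    rw [List.drop_drop]
    congr 1
    · omega
    · congr 1; omega
  rw [hb]

-- A's fold equals the chunked recursion (fuel = length bound)
theorem pvA_main (k : Int) (hk : 1 ≤ k) :
    ∀ (n : Nat) (pages : List (Int × String)), pages.length ≤ n → ∀ acc,
      (PySem.List.pyRange 0 (pages.length : Int) k).foldl (pvStepA pages k) acc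
        = pvChunk k.toNat acc pages := by
  intro n
  induction n with
  | zero =>
      intro pages hlen acc
      have : pages = [] := List.eq_nil_of_length_eq_zero (by omega)
      subst this
      simp [pvChunk_nil, pvRange_nonpos 0 k (by omega) (by omega)]
  | succ m ih =>
      intro pages hlen acc
      match pages with
      | [] => simp [pvChunk_nil, pvRange_nonpos 0 k (by omega) (by omega)]
      | p :: ps =>
        have hlp : (0:Int) < ((p :: ps).length : Int) := by simp only [List.length_cons]; push_cast; omega
        rw [pvRange_shift _ k hk hlp, List.foldl_cons]
        -- first iteration produces the first flush
        have hfirst : pvStepA (p :: ps) k acc 0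
            = pvFlushB acc ((p :: ps.take (k.toNat - 1)).map (fun q => q.2)) p.1 := by
          unfold pvStepA pvFlushB
          have hsl : PySem.List.slice (p :: ps) (some 0) (some (0 + k))
              = p :: ps.take (k.toNat - 1) := by
            rw [PySem.List.slice_toNat _ (by omega) (by omega)]
            simp
            have : k.toNat = (k.toNat - 1) + 1 := by omega
            rw [this]
            simp [List.take_succ_cons]
          rw [hsl]
          simp [PySem.List.pyGet?, PySem.List.pyIdx?]
        -- remaining iterations act on the dropped list
        have hmap : ((PySem.List.pyRange 0 (((p :: ps).length : Int) - k) k).map (fun s => s + k)).foldl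
              (pvStepA (p :: ps) k) (pvStepA (p :: ps) k acc 0)
            = (PySem.List.pyRange 0 ((((p :: ps).drop k.toNat).length : Int)) k).foldl
              (pvStepA ((p :: ps).drop k.toNat) k) (pvStepA (p :: ps) k acc 0) := by
          have hlen2 : ((((p :: ps).drop k.toNat).length : Int)) = max 0 (((p :: ps).length : Int) - k) := by
            simp; omega
          by_cases hkn : k ≤ ((p :: ps).length : Int)
          · have : max 0 (((p :: ps).length : Int) - k) = ((p :: ps).length : Int) - k := by omega
            rw [hlen2, this, List.foldl_map]
            apply PySem.List.foldl_congr_mem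
            intro a s hs
            have hs0 : 0 ≤ s := ((PySem.List.mem_pyRange_iff_of_pos (by omega) s).mp hs).1
            exact pvStepA_shift (p :: ps) k s hk hs0 a
          · have h1 : PySem.List.pyRange 0 (((p :: ps).length : Int) - k) k = [] := by
              rw [PySem.List.pyRange_of_pos _ _ (by omega : (0:Int) < k), if_neg (by omega)]
              simp
            have h2 : PySem.List.pyRange 0 ((((p :: ps).drop k.toNat).length : Int)) k = [] := by
              rw [PySem.List.pyRange_of_pos _ _ (by omega : (0:Int) < k), if_neg (by omega)]
              simp
            rw [h1, h2]
            simp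
        rw [hmap, ih ((p :: ps).drop k.toNat)
          (by simp only [List.length_drop, List.length_cons]; simp at hlen; omega)]
        rw [hfirst, pvChunk_cons]
        obtain ⟨j, hj⟩ : ∃ j, k.toNat = j + 1 := ⟨k.toNat - 1, by omega⟩
        rw [hj]
        simp [List.drop_succ_cons]

-- B's buffer-filling phase (buf non-empty, below capacity)
theorem pvB_fill (k : Int) (hk : 1 ≤ k) :
    ∀ (xs : List (Int × String)) (buf : List String) (acc : List (String × String)) (sp : Int),
      buf ≠ [] → buf.length < k.toNat →
      xs.foldl (pvStepB k) (acc, buf, sp) =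
        if xs.length < k.toNat - buf.length then (acc, buf ++ xs.map (fun q => q.2), sp)
        else (xs.drop (k.toNat - buf.length)).foldl (pvStepB k)
          (pvFlushB acc (buf ++ (xs.take (k.toNat - buf.length)).map (fun q => q.2)) sp, [], sp) := by
  intro xs
  induction xs with
  | nil =>
      intro buf acc sp hne hlt
      rw [if_pos (by simp only [List.length_nil]; omega)]
      simp
  | cons x xs ih =>
      intro buf acc sp hne hlt
      have hstep : pvStepB k (acc, buf, sp) x
          = if ((buf ++ [x.2]).length : Int) ≥ k then (pvFlushB acc (buf ++ [x.2]) sp, ([] : List String), sp)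
            else (acc, buf ++ [x.2], sp) := by
        unfold pvStepB
        simp [List.isEmpty_iff, hne]
      by_cases hfull : buf.length + 1 = k.toNat
      · rw [List.foldl_cons, hstep,
          if_pos (by simp only [List.length_append, List.length_cons, List.length_nil]; omega),
          if_neg (by simp only [List.length_cons]; omega)]
        have ht : k.toNat - buf.length = 1 := by omega
        rw [ht]
        simp
      · have hlt' : (buf ++ [x.2]).length < k.toNat := by
          simp only [List.length_append, List.length_cons, List.length_nil]
          omega
        rw [List.foldl_cons, hstep,
          if_neg (by simp only [List.length_append, List.length_cons, List.length_nil]; omega)]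
        rw [ih (buf ++ [x.2]) acc sp (by simp) hlt']
        have hlb : (buf ++ [x.2]).length = buf.length + 1 := by simp
        by_cases hc : xs.length < k.toNat - (buf.length + 1)
        · rw [if_pos (by rw [hlb]; exact hc), if_pos (by simp only [List.length_cons]; omega)]
          simp
        · rw [if_neg (by rw [hlb]; exact hc), if_neg (by simp only [List.length_cons]; omega)]
          have htk : k.toNat - buf.length = (k.toNat - (buf.length + 1)) + 1 := by omega
          rw [htk, List.take_succ_cons, List.drop_succ_cons, hlb]
          simp

-- B's fold (from an empty buffer) equals the chunked recursion (fuel = length bound)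
def pvFinal (st : List (String × String) × List String × Int) : List (String × String) :=
  if st.2.1 ≠ [] then pvFlushB st.1 st.2.1 st.2.2 else st.1

theorem pvB_main (k : Int) (hk : 1 ≤ k) :
    ∀ (n : Nat) (l : List (Int × String)), l.length ≤ n → ∀ acc sp,
      pvFinal (l.foldl (pvStepB k) (acc, [], sp)) = pvChunk k.toNat acc l := by
  intro n
  induction n with
  | zero =>
      intro l hlen acc sp
      have : l = [] := List.eq_nil_of_length_eq_zero (by omega)
      subst this
      simp [pvChunk_nil, pvFinal]
  | succ m ih =>
      intro l hlen acc sp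
      match l with
      | [] => simp [pvChunk_nil, pvFinal]
      | p :: ps =>
        have hlen' : ps.length ≤ m := by
          simp only [List.length_cons] at hlen
          omega
        have hstep : pvStepB k (acc, [], sp) p
            = if ((1:Int)) ≥ k then (pvFlushB acc [p.2] p.1, ([] : List String), p.1)
              else (acc, [p.2], p.1) := by
          unfold pvStepB
          simp
        rw [List.foldl_cons, hstep]
        by_cases hk1 : k = 1
        · rw [if_pos (by omega)]
          rw [ih ps hlen' (pvFlushB acc [p.2] p.1) p.1]
          rw [pvChunk_cons]
          simp [hk1]
        · rw [if_neg (by omega)]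
          rw [pvB_fill k hk ps [p.2] acc p.1 (by simp)
            (by simp only [List.length_cons, List.length_nil]; omega)]
          have hl1 : ([p.2] : List String).length = 1 := rfl
          by_cases hc : ps.length < k.toNat - 1
          · rw [if_pos (by rw [hl1]; exact hc)]
            have htake : ps.take (k.toNat - 1) = ps := List.take_of_length_le (by omega)
            have hdrop : ps.drop (k.toNat - 1) = [] := List.drop_eq_nil_of_le (by omega)
            simp only [pvChunk_cons, htake, hdrop, pvChunk_nil, pvFinal]
            simp
          · rw [if_neg (by rw [hl1]; exact hc), hl1]
            rw [ih (ps.drop (k.toNat - 1)) (by simp only [List.length_drop]; omega)]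
            rw [pvChunk_cons]
            simp

-- ===== VERDICT (by name: the statement is the Claim_ definition above) =====
theorem group_by_page_count_py_spec : Claim_equal_group_by_page_count_py := by
  intro pages pps _ hpre
  unfold Spec_group_by_page_count_py group_by_page_count_py group_by_page_count_py_alt
  rw [pvA_main pps hpre pages.length pages (le_refl _) []]
  have hB := pvB_main pps hpre pages.length pages (le_refl _) [] 0
  unfold pvFinal at hB
  rw [← hB]
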